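-- pv_equiv track=rewrite | github.com/you-shall-not-parse/discord-bot-7drtratrack | cogs/rosterizer.py | _rank_index_from_display_name
-- ===== SOURCE A (Python) =====
-- RANK_ORDER: list[tuple[str, list[str]]] = [
--     ("FM", ["Field Marshal", "FM"]),
--     ("GEN", ["General", "Gen"]),
--     ("LTGEN", ["Lieutenant General", "Lt Gen", "Lt.Gen", "LtGen", "Lt-Gen"]),
--     ("MAJGEN", ["Major General", "Maj Gen", "Maj.Gen", "MajGen", "Maj-Gen"]),
--     ("BRIG", ["Brigadier", "Brig"]),
--
--     ("COL", ["Colonel", "Col"]),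
--     ("LTCOL", ["Lieutenant Colonel", "Lt Col", "Lt. Col", "Lt.Col", "LtCol", "Lt-Col"]),
--     ("MAJ", ["Major", "Maj"]),
--     ("CPT", ["Captain", "Cpt"]),
--     ("LT", ["Lieutenant", "Lt", "Lt."]),
--     ("2LT", ["2nd Lieutenant", "2Lt", "2Lt.", "2ndLt", "2nd Lt", "2 Lt"]),
--
--     ("RSM", ["Regimental Sergeant Major", "Regimental Sargent Major", "RSM"]),
--     ("WO1", ["Warrant Officer 1st Class", "Warrant Officer 1", "WO1"]),
--     ("WO2", ["Warrant Officer 2nd Class", "Warrant Officer 2", "WO2"]),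
--
--     ("SGM", ["Sergeant Major", "Sergeant major", "SGM"]),
--     ("SSG", ["Staff Sergeant", "Staff Sargent", "SSG"]),
--
--     ("SGT", ["Sergeant", "Sgt"]),
--     ("CPL", ["Corporal", "Cpl"]),
--     ("LCPL", ["Lance Corporal", "L.Cpl", "LCpl", "L Cpl"]),
--     ("PTE", ["Private", "Pte", "Pte."])
-- ]
--
-- def _rank_index_from_display_name(display_name: str) -> int:
--     """Return rank order index for sorting (lower is higher rank).
--
--     Uses the order of RANK_PREFIXES as the precedence list.
--     If no rank prefix is detected, returns a large value (sorted last).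
--     """
--
--     if not display_name:
--         return 10_000
--
--     s = display_name.strip()
--     if "#" in s:
--         s = s.split("#", 1)[0].strip()
--     s = " ".join(s.split())
--     s_lower = s.lower()
--
--     best_order: int | None = None
--     best_len = -1
--
--     for order_idx, (_code, variants) in enumerate(RANK_ORDER):
--         for prefix in variants:
--             p = str(prefix).strip()
--             if not p:
--                 continue
--             p_lower = p.lower()
--
--             # Match at the very start. Allow whitespace or '.' after the prefix.
--             if s_lower == p_lower or s_lower.startswith(p_lower + " ") or s_lower.startswith(p_lower + "."):
--                 if len(p_lower) > best_len:
--                     best_len = len(p_lower)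
--                     best_order = order_idx
--
--     return best_order if best_order is not None else 10_000
-- ===== SOURCE B (Python) =====
-- RANK_ORDER: list[tuple[str, list[str]]] = [
--     ("FM", ["Field Marshal", "FM"]),
--     ("GEN", ["General", "Gen"]),
--     ("LTGEN", ["Lieutenant General", "Lt Gen", "Lt.Gen", "LtGen", "Lt-Gen"]),
--     ("MAJGEN", ["Major General", "Maj Gen", "Maj.Gen", "MajGen", "Maj-Gen"]),
--     ("BRIG", ["Brigadier", "Brig"]),
--     ("COL", ["Colonel", "Col"]),
--     ("LTCOL", ["Lieutenant Colonel", "Lt Col", "Lt. Col", "Lt.Col", "LtCol", "Lt-Col"]),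
--     ("MAJ", ["Major", "Maj"]),
--     ("CPT", ["Captain", "Cpt"]),
--     ("LT", ["Lieutenant", "Lt", "Lt."]),
--     ("2LT", ["2nd Lieutenant", "2Lt", "2Lt.", "2ndLt", "2nd Lt", "2 Lt"]),
--     ("RSM", ["Regimental Sergeant Major", "Regimental Sargent Major", "RSM"]),
--     ("WO1", ["Warrant Officer 1st Class", "Warrant Officer 1", "WO1"]),
--     ("WO2", ["Warrant Officer 2nd Class", "Warrant Officer 2", "WO2"]),
--     ("SGM", ["Sergeant Major", "Sergeant major", "SGM"]),
--     ("SSG", ["Staff Sergeant", "Staff Sargent", "SSG"]),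
--     ("SGT", ["Sergeant", "Sgt"]),
--     ("CPL", ["Corporal", "Cpl"]),
--     ("LCPL", ["Lance Corporal", "L.Cpl", "LCpl", "L Cpl"]),
--     ("PTE", ["Private", "Pte", "Pte."])
-- ]
--
-- # Flat prefix table built once: (prefix_lower, order_idx) for every non-empty
-- # variant, stably sorted by descending prefix length so that the FIRST match
-- # is the longest one (earliest rank on length ties).
-- _PREFIX_TABLE = sorted(
--     ((str(prefix).strip().lower(), order_idx)
--      for order_idx, (_code, variants) in enumerate(RANK_ORDER)
--      for prefix in variants
--      if str(prefix).strip()),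
--     key=lambda t: len(t[0]),
--     reverse=True,
-- )
--
--
-- def _rank_index_from_display_name(display_name: str) -> int:
--     s = display_name.strip()
--     if "#" in s:
--         s = s.split("#", 1)[0].strip()
--     s_lower = " ".join(s.split()).lower()
--
--     for p, order_idx in _PREFIX_TABLE:
--         if s_lower == p or s_lower.startswith(p + " ") or s_lower.startswith(p + "."):
--             return order_idx
--     return 10_000
-- ===== Notes on version B (the rewrite author's own statement) =====
-- stated objective: alternative
-- what changed: Replaces the nested loop that tracks the best (longest, earliest) matching rank prefix with a flat (prefix_lower, order_idx) table built and stably sorted once by descending prefix length, so the lookup is a single first-match scan of that table.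
import Mathlib
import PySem

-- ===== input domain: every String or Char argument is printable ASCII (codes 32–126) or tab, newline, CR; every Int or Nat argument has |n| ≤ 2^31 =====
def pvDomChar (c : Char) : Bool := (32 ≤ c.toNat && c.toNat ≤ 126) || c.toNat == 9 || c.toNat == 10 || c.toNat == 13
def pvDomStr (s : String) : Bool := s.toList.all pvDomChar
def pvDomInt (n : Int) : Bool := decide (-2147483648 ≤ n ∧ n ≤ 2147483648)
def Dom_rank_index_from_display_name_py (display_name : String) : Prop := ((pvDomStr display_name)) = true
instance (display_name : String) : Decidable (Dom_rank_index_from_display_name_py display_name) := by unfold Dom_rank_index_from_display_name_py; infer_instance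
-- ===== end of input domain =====

-- B replaces the nested best-length scan with a flat prefix table sorted once by descending length; first match wins (alternative decomposition, same behaviour).

def RANK_ORDER : List (String × List String) :=
  [("FM", ["Field Marshal", "FM"]),
   ("GEN", ["General", "Gen"]),
   ("LTGEN", ["Lieutenant General", "Lt Gen", "Lt.Gen", "LtGen", "Lt-Gen"]),
   ("MAJGEN", ["Major General", "Maj Gen", "Maj.Gen", "MajGen", "Maj-Gen"]),
   ("BRIG", ["Brigadier", "Brig"]),
   ("COL", ["Colonel", "Col"]),
   ("LTCOL", ["Lieutenant Colonel", "Lt Col", "Lt. Col", "Lt.Col", "LtCol", "Lt-Col"]),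
   ("MAJ", ["Major", "Maj"]),
   ("CPT", ["Captain", "Cpt"]),
   ("LT", ["Lieutenant", "Lt", "Lt."]),
   ("2LT", ["2nd Lieutenant", "2Lt", "2Lt.", "2ndLt", "2nd Lt", "2 Lt"]),
   ("RSM", ["Regimental Sergeant Major", "Regimental Sargent Major", "RSM"]),
   ("WO1", ["Warrant Officer 1st Class", "Warrant Officer 1", "WO1"]),
   ("WO2", ["Warrant Officer 2nd Class", "Warrant Officer 2", "WO2"]),
   ("SGM", ["Sergeant Major", "Sergeant major", "SGM"]),
   ("SSG", ["Staff Sergeant", "Staff Sargent", "SSG"]),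
   ("SGT", ["Sergeant", "Sgt"]),
   ("CPL", ["Corporal", "Cpl"]),
   ("LCPL", ["Lance Corporal", "L.Cpl", "LCpl", "L Cpl"]),
   ("PTE", ["Private", "Pte", "Pte."])]

-- ===== PORT A =====
-- inner loop over variants of one rank entry (helper for the port's nested loop)
def pvStepA (s : String) (st : Int × Option Int) (oi : Int × String × List String) : Int × Option Int :=
  oi.2.2.foldl (fun st pr =>
    let p := PySem.Str.strip pr
    if p == "" then st
    else
      let p_lower := PySem.Str.lower p
      if s == p_lower || PySem.Str.startswith s (p_lower ++ " ") || PySem.Str.startswith s (p_lower ++ ".") then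
        if st.1 < PySem.Str.len p_lower then (PySem.Str.len p_lower, some oi.1) else st
      else st) st

def rank_index_from_display_name_py (display_name : String) : Int :=
  if display_name == "" then 10000
  else
    let s0 := PySem.Str.strip display_name
    -- s.split("#", 1)[0]: split with a non-empty separator always yields at least one piece, so [0] never raises (headD is exact here)
    let s1 := if PySem.Str.isIn "#" s0 then PySem.Str.strip (((PySem.Str.splitMax? s0 "#" 1).getD []).headD "") else s0
    let s2 := PySem.Str.join " " (PySem.Str.split₀ s1)
    let s_lower := PySem.Str.lower s2
    let st := (PySem.List.enumerate RANK_ORDER 0).foldl (pvStepA s_lower) (-1, none)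
    -- 'best_order if best_order is not None else 10_000'
    st.2.getD 10000

-- ===== PORT B =====
-- flat (prefix_lower, order_idx) table, one entry per non-empty variant
def pvPrefixTable : List (String × Int) :=
  (PySem.List.enumerate RANK_ORDER 0).flatMap (fun oi =>
    (oi.2.2.filter (fun pr => !(PySem.Str.strip pr == ""))).map
      (fun pr => (PySem.Str.lower (PySem.Str.strip pr), oi.1)))

-- sorted(…, key=lambda t: len(t[0]), reverse=True): stable, longest prefixes first
def pvSortedTable : List (String × Int) :=
  PySem.List.sorted pvPrefixTable (fun t => PySem.Str.len t.1) true

def pvScan (s : String) : List (String × Int) → Int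
  | [] => 10000
  | (p, i) :: rest =>
    if s == p || PySem.Str.startswith s (p ++ " ") || PySem.Str.startswith s (p ++ ".") then i
    else pvScan s rest

def rank_index_from_display_name_py_alt (display_name : String) : Int :=
  let s0 := PySem.Str.strip display_name
  let s1 := if PySem.Str.isIn "#" s0 then PySem.Str.strip (((PySem.Str.splitMax? s0 "#" 1).getD []).headD "") else s0
  let s_lower := PySem.Str.lower (PySem.Str.join " " (PySem.Str.split₀ s1))
  pvScan s_lower pvSortedTable

-- ===== PRECONDITION & SPEC =====
def Spec_rank_index_from_display_name_py (display_name : String) (out : Int) : Prop := out = rank_index_from_display_name_py_alt display_name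
instance (display_name : String) (out : Int) : Decidable (Spec_rank_index_from_display_name_py display_name out) := by unfold Spec_rank_index_from_display_name_py; infer_instance

-- ===== CLAIM (what is proved, stated in full; the proofs are below) =====
def Claim_equal_rank_index_from_display_name_py : Prop := ∀ (display_name : String), Dom_rank_index_from_display_name_py display_name → Spec_rank_index_from_display_name_py display_name (rank_index_from_display_name_py display_name)

-- ===== LEMMAS AND PROOFS =====

-- the flat prefix table, written out (pvPrefixTable evaluates to it)
def pvFlat : List (String × Int) :=
  [("field marshal", 0), ("fm", 0), ("general", 1), ("gen", 1), ("lieutenant general", 2), ("lt gen", 2), ("lt.gen", 2), ("ltgen", 2), ("lt-gen", 2), ("major general", 3), ("maj gen", 3), ("maj.gen", 3), ("majgen", 3), ("maj-gen", 3), ("brigadier", 4), ("brig", 4), ("colonel", 5), ("col", 5), ("lieutenant colonel", 6), ("lt col", 6), ("lt. col", 6), ("lt.col", 6), ("ltcol", 6), ("lt-col", 6), ("major", 7), ("maj", 7), ("captain", 8), ("cpt", 8), ("lieutenant", 9), ("lt", 9), ("lt.", 9), ("2nd lieutenant", 10), ("2lt", 10), ("2lt.", 10), ("2ndlt", 10),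 ("2nd lt", 10), ("2 lt", 10), ("regimental sergeant major", 11), ("regimental sargent major", 11), ("rsm", 11), ("warrant officer 1st class", 12), ("warrant officer 1", 12), ("wo1", 12), ("warrant officer 2nd class", 13), ("warrant officer 2", 13), ("wo2", 13), ("sergeant major", 14), ("sergeant major", 14), ("sgm", 14), ("staff sergeant", 15), ("staff sargent", 15), ("ssg", 15), ("sergeant", 16), ("sgt", 16), ("corporal", 17), ("cpl", 17), ("lance corporal", 18), ("l.cpl", 18), ("lcpl", 18), ("l cpl", 18), ("private", 19), ("pte", 19), ("pte.", 19)]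

def pvM (s p : String) : Bool :=
  s == p || PySem.Str.startswith s (p ++ " ") || PySem.Str.startswith s (p ++ ".")

-- A's loop as structural recursion on the flat table
def pvGo (s : String) : List (String × Int) → Int × Option Int → Int × Option Int
  | [], st => st
  | (p, i) :: rest, st =>
    if pvM s p then
      (if st.1 < PySem.Str.len p then pvGo s rest (PySem.Str.len p, some i) else pvGo s rest st)
    else pvGo s rest st

-- first match longer than bl, else the default
def pvH (s : String) (bl : Int) : List (String × Int) → Option Int → Option Int
  | [], b => b
  | (p, i) :: rest, b =>
    if pvM s p = true ∧ bl < PySem.Str.len p then some i else pvH s bl rest b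

-- stable insertion sort by strictly descending length
def pvIns (x : String × Int) : List (String × Int) → List (String × Int)
  | [] => [x]
  | y :: ys => if PySem.Str.len x.1 < PySem.Str.len y.1 then y :: pvIns x ys else x :: y :: ys

def pvSortINS : List (String × Int) → List (String × Int)
  | [] => []
  | x :: xs => pvIns x (pvSortINS xs)

def pvDesc (S : List (String × Int)) : Prop :=
  S.Pairwise (fun a b => PySem.Str.len b.1 ≤ PySem.Str.len a.1)

theorem pvMem_ins (x e : String × Int) (S : List (String × Int)) :
    e ∈ pvIns x S ↔ e = x ∨ e ∈ S := by
  induction S with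
  | nil => simp [pvIns]
  | cons y ys ih =>
    simp only [pvIns]
    split
    · simp [ih]; tauto
    · simp

theorem pvDesc_ins (x : String × Int) (S : List (String × Int)) (h : pvDesc S) : pvDesc (pvIns x S) := by
  induction S with
  | nil => simp [pvIns, pvDesc]
  | cons y ys ih =>
    rcases (List.pairwise_cons.mp h) with ⟨hy, hys⟩
    simp only [pvIns]
    split
    · refine List.pairwise_cons.mpr ⟨?_, ih hys⟩
      intro e he
      rcases (pvMem_ins x e ys).mp he with rfl | he
      · omega
      · exact hy e he
    · refine List.pairwise_cons.mpr ⟨?_, h⟩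
      intro e he
      rcases List.mem_cons.mp he with rfl | he
      · omega
      · have := hy e he; omega

theorem pvDesc_sortINS (L : List (String × Int)) : pvDesc (pvSortINS L) := by
  induction L with
  | nil => simp [pvSortINS, pvDesc]
  | cons x xs ih => exact pvDesc_ins x _ ih

theorem pvH_allsmall (s : String) (n : Int) (S : List (String × Int)) (b : Option Int)
    (h : ∀ e ∈ S, PySem.Str.len e.1 ≤ n) : pvH s n S b = b := by
  induction S with
  | nil => rfl
  | cons y ys ih =>
    have hy := h y (List.mem_cons_self ..)
    simp only [pvH]
    rw [if_neg (by rintro ⟨-, h2⟩; omega)]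
    exact ih (fun e he => h e (List.mem_cons_of_mem y he))

theorem pvH_skip (s : String) (bl : Int) (x : String × Int) (S : List (String × Int)) (b : Option Int)
    (h : ¬ (pvM s x.1 = true ∧ bl < PySem.Str.len x.1)) :
    pvH s bl (pvIns x S) b = pvH s bl S b := by
  induction S with
  | nil => simp only [pvIns, pvH, if_neg h]
  | cons y ys ih =>
    simp only [pvIns]
    split
    · simp only [pvH]; split
      · rfl
      · exact ih
    · simp only [pvH, if_neg h]

theorem pvH_take (s : String) (bl : Int) (p : String) (i : Int) (S : List (String × Int)) (b : Option Int)
    (hm : pvM s p = true) (hl : bl < PySem.Str.len p) (hd : pvDesc S) :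
    pvH s bl (pvIns (p, i) S) b = pvH s (PySem.Str.len p) S (some i) := by
  induction S with
  | nil =>
    simp only [pvIns, pvH]
    rw [if_pos ⟨hm, hl⟩]
  | cons y ys ih =>
    rcases (List.pairwise_cons.mp hd) with ⟨hy, hys⟩
    simp only [pvIns]
    split
    · next hlen =>
      simp only [pvH]
      by_cases hmy : pvM s y.1 = true
      · rw [if_pos (⟨hmy, by omega⟩ : pvM s y.1 = true ∧ bl < PySem.Str.len y.1),
           if_pos (⟨hmy, by omega⟩ : pvM s y.1 = true ∧ PySem.Str.len p < PySem.Str.len y.1)]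
      · rw [if_neg (by tauto), if_neg (by tauto)]
        exact ih hys
    · next hlen =>
      simp only [pvH]
      rw [if_pos ⟨hm, hl⟩, if_neg (by rintro ⟨-, h2⟩; omega)]
      exact (pvH_allsmall s _ ys (some i) (fun e he => by have := hy e he; omega)).symm

theorem pvGo_eq_pvH (s : String) (L : List (String × Int)) (bl : Int) (b : Option Int) :
    (pvGo s L (bl, b)).2 = pvH s bl (pvSortINS L) b := by
  induction L generalizing bl b with
  | nil => rfl
  | cons x xs ih =>
    obtain ⟨p, i⟩ := x
    simp only [pvGo, pvSortINS]
    by_cases hm : pvM s p = true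
    · rw [if_pos hm]
      by_cases hl : bl < PySem.Str.len p
      · rw [if_pos hl, ih, pvH_take s bl p i _ b hm hl (pvDesc_sortINS xs)]
      · rw [if_neg hl, ih, pvH_skip s bl (p, i) _ b (by tauto)]
    · rw [if_neg hm, ih, pvH_skip s bl (p, i) _ b (by tauto)]

theorem pvLen_nonneg (p : String) : (0 : Int) ≤ PySem.Str.len p := by
  simp [PySem.Str.len_eq]

theorem pvH_neg_one_eq_scan (s : String) (S : List (String × Int)) :
    (pvH s (-1) S none).getD 10000 = pvScan s S := by
  induction S with
  | nil => rfl
  | cons x xs ih =>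
    obtain ⟨p, i⟩ := x
    simp only [pvH, pvScan]
    by_cases hm : pvM s p = true
    · rw [if_pos ⟨hm, by have := pvLen_nonneg p; omega⟩]
      simp only [pvM] at hm
      rw [if_pos hm]
      rfl
    · rw [if_neg (by tauto)]
      simp only [pvM] at hm
      rw [if_neg hm]
      exact ih

-- A's loop step on the flat preprocessed table
def pvStepClean (s : String) (st : Int × Option Int) (x : String × Int) : Int × Option Int :=
  if pvM s x.1 then
    (if st.1 < PySem.Str.len x.1 then (PySem.Str.len x.1, some x.2) else st)
  else st

-- A's loop step on a raw (prefix, idx) pair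
def pvStepRaw (s : String) (st : Int × Option Int) (x : String × Int) : Int × Option Int :=
  let p := PySem.Str.strip x.1
  if p == "" then st
  else
    let p_lower := PySem.Str.lower p
    if s == p_lower || PySem.Str.startswith s (p_lower ++ " ") || PySem.Str.startswith s (p_lower ++ ".") then
      if st.1 < PySem.Str.len p_lower then (PySem.Str.len p_lower, some x.2) else st
    else st

def pvRawOf (G : List (Int × String × List String)) : List (String × Int) :=
  G.flatMap (fun oi => oi.2.2.map (fun pr => (pr, oi.1)))

def pvClean : List (String × Int) → List (String × Int)
  | [] => []
  | x :: xs =>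
    if PySem.Str.strip x.1 == "" then pvClean xs
    else (PySem.Str.lower (PySem.Str.strip x.1), x.2) :: pvClean xs

theorem pvNested_eq_raw (s : String) (G : List (Int × String × List String)) (st : Int × Option Int) :
    G.foldl (pvStepA s) st = (pvRawOf G).foldl (pvStepRaw s) st := by
  induction G generalizing st with
  | nil => rfl
  | cons g gs ih =>
    have h1 : pvStepA s st g = (g.2.2.map (fun pr => (pr, g.1))).foldl (pvStepRaw s) st := by
      rw [List.foldl_map]
      rfl
    show gs.foldl (pvStepA s) (pvStepA s st g) = _
    rw [ih, h1]
    simp only [pvRawOf, List.flatMap_cons, List.foldl_append]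

theorem pvRaw_eq_clean (s : String) (L : List (String × Int)) (st : Int × Option Int) :
    L.foldl (pvStepRaw s) st = (pvClean L).foldl (pvStepClean s) st := by
  induction L generalizing st with
  | nil => rfl
  | cons x xs ih =>
    by_cases he : (PySem.Str.strip x.1 == "") = true
    · have h1 : pvStepRaw s st x = st := by
        simp only [pvStepRaw]
        rw [if_pos he]
      simp only [List.foldl_cons, pvClean, if_pos he, h1]
      exact ih st
    · have he' : (PySem.Str.strip x.1 == "") = false := by
        rwa [Bool.not_eq_true] at he
      have h1 : pvStepRaw s st x = pvStepClean s st (PySem.Str.lower (PySem.Str.strip x.1), x.2) := by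
        simp only [pvStepRaw, pvStepClean, pvM, he', Bool.false_eq_true, if_false]
      simp only [List.foldl_cons, pvClean, if_neg he, h1]
      exact ih _

set_option maxRecDepth 100000 in
set_option maxHeartbeats 4000000 in
theorem pvClean_raw_eq_flat : pvClean (pvRawOf (PySem.List.enumerate RANK_ORDER 0)) = pvFlat := by decide

theorem pvFoldl_eq_go (s : String) (L : List (String × Int)) (st : Int × Option Int) :
    L.foldl (pvStepClean s) st = pvGo s L st := by
  induction L generalizing st with
  | nil => rfl
  | cons x xs ih =>
    obtain ⟨p, i⟩ := x
    simp only [List.foldl_cons, pvGo, pvStepClean]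
    split
    · split <;> exact ih _
    · exact ih _

set_option maxRecDepth 100000 in
set_option maxHeartbeats 4000000 in
theorem pvSorted_eq_sortINS : pvSortedTable = pvSortINS pvFlat := by decide

theorem pvMain (s : String) :
    (((PySem.List.enumerate RANK_ORDER 0).foldl (pvStepA s) (-1, none)).2).getD 10000 = pvScan s pvSortedTable := by
  rw [pvNested_eq_raw, pvRaw_eq_clean, pvClean_raw_eq_flat, pvFoldl_eq_go, pvGo_eq_pvH,
    pvH_neg_one_eq_scan, pvSorted_eq_sortINS]

set_option maxRecDepth 100000 in
set_option maxHeartbeats 4000000 in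
theorem pvAlt_empty : rank_index_from_display_name_py_alt "" = 10000 := by decide

set_option maxRecDepth 100000 in
set_option maxHeartbeats 4000000 in
theorem pvA_empty : rank_index_from_display_name_py "" = 10000 := by
  unfold rank_index_from_display_name_py
  simp

set_option maxRecDepth 100000 in
set_option maxHeartbeats 4000000 in
theorem pvA_eq_alt_of_ne (dn : String) (h : dn ≠ "") :
    rank_index_from_display_name_py dn = rank_index_from_display_name_py_alt dn := by
  have hb : (dn == "") = false := by simpa using h
  unfold rank_index_from_display_name_py rank_index_from_display_name_py_alt
  simp only [hb, Bool.false_eq_true, if_false]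
  exact pvMain _

-- ===== VERDICT (by name: the statement is the Claim_ definition above) =====
theorem rank_index_from_display_name_py_spec : Claim_equal_rank_index_from_display_name_py := by
  intro dn _
  unfold Spec_rank_index_from_display_name_py
  by_cases h : dn = ""
  · subst h
    rw [pvAlt_empty, pvA_empty]
  · exact pvA_eq_alt_of_ne dn h
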